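-- pv_equiv track=rewrite | github.com/padasch/tree_mortality_french_nfi | src/random_forest_utils.py | backcalculate_season
-- ===== SOURCE A (Python) =====
-- def backcalculate_season(start, months):
--     # User input
--     valid_seasons = ["Winter", "Spring", "Summer", "Fall"]
--     # Make sure the number of months is a multiple of 3
--     if months == 1 or months == 3:
--         return start
--     elif months % 3 != 0:
--         raise ValueError("The number of months must be a multiple of 3.")
--
--     # Create a mapping from season name to index and vice versa
--     season_to_index = {season: i for i, season in enumerate(valid_seasons)}
--     index_to_season = {i: season for i, season in enumerate(valid_seasons)}
--
--     # Get the starting season's index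
--     start_index = season_to_index[start]
--
--     # Calculate the number of seasons to go back
--     seasons_to_go_back = (months // 3) % 4 - 1
--
--     # Calculate the resulting season's index
--     final_index = (start_index - seasons_to_go_back) % 4
--
--     # Get the resulting season from the index
--     final_season = index_to_season[final_index]
--
--     return final_season
-- ===== SOURCE B (Python) =====
-- def backcalculate_season(start, months):
--     seasons = ["Winter", "Spring", "Summer", "Fall"]
--     if months == 1 or months == 3:
--         return start
--     if months % 3 != 0:
--         raise ValueError("The number of months must be a multiple of 3.")
--     idx = seasons.index(start)
--     for _ in range((months // 3 - 1) % 4):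
--         idx = (idx - 1) % 4
--     return seasons[idx]
-- ===== Notes on version B (the rewrite author's own statement) =====
-- stated objective: alternative
-- what changed: Replaces A's dict-based closed-form modular index arithmetic with a list index lookup and an explicit loop that walks the 4-season cycle back one step per season ((months//3 - 1) % 4 iterations).
import Mathlib
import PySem

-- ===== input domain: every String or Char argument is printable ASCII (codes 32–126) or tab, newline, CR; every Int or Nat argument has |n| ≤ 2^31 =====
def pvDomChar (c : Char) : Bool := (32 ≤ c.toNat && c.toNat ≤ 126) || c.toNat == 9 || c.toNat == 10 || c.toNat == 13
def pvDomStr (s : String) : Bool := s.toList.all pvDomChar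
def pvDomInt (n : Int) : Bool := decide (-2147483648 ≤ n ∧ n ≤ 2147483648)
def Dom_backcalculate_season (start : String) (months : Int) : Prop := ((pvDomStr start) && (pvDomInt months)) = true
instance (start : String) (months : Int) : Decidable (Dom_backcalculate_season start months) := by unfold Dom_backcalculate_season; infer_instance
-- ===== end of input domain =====

-- B replaces A's closed-form modular-index arithmetic by an explicit walk: it steps the
-- season index back one position per season over the 4-cycle ((months//3 - 1) % 4 steps).
-- Objective: alternative (iterative cycle walk vs closed-form arithmetic); no speed claim.

-- ===== PORT A =====
def backcalculate_season (start : String) (months : Int) : String :=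
  let valid_seasons : List String := ["Winter", "Spring", "Summer", "Fall"]
  if months = 1 ∨ months = 3 then start
  else
    -- (on months % 3 ≠ 0 the Python raises ValueError; excluded by Pre_)
    let season_to_index : PySem.Dict String Int :=
      (PySem.List.enumerate valid_seasons).foldl (fun d p => d.insert p.2 p.1) PySem.Dict.empty
    let index_to_season : PySem.Dict Int String :=
      (PySem.List.enumerate valid_seasons).foldl (fun d p => d.insert p.1 p.2) PySem.Dict.empty
    -- season_to_index[start]: KeyError (none) excluded by Pre_
    let start_index : Int := (season_to_index.get? start).getD 0
    let seasons_to_go_back : Int := PySem.Int.mod (PySem.Int.floordiv months 3) 4 - 1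
    let final_index : Int := PySem.Int.mod (start_index - seasons_to_go_back) 4
    (index_to_season.get? final_index).getD ""

-- ===== PORT B =====
def backcalculate_season_alt (start : String) (months : Int) : String :=
  let seasons : List String := ["Winter", "Spring", "Summer", "Fall"]
  if months = 1 ∨ months = 3 then start
  else
    -- (on months % 3 ≠ 0 the Python raises ValueError; excluded by Pre_)
    -- seasons.index(start): ValueError (none) excluded by Pre_
    let idx : Int := ((PySem.List.index? seasons start).map (fun n => (n : Int))).getD 0
    let idx := (PySem.List.pyRange 0 (PySem.Int.mod (PySem.Int.floordiv months 3 - 1) 4) 1).foldl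
      (fun i _ => PySem.Int.mod (i - 1) 4) idx
    (PySem.List.pyGet? seasons idx).getD ""

-- ===== PRECONDITION & SPEC =====
-- Pre_ excludes exactly the inputs where the Python A raises: months not a multiple of 3
-- (and ≠ 1) → ValueError; start not a valid season name (unless months is 1 or 3) → KeyError.
def Pre_backcalculate_season (start : String) (months : Int) : Prop :=
  months = 1 ∨ months = 3 ∨
    (PySem.Int.mod months 3 = 0 ∧ start ∈ ["Winter", "Spring", "Summer", "Fall"])
instance (start : String) (months : Int) : Decidable (Pre_backcalculate_season start months) := by
  unfold Pre_backcalculate_season; infer_instance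

def pvWitness_backcalculate_season : String × Int := ("Summer", 6)

def Spec_backcalculate_season (start : String) (months : Int) (out : String) : Prop := out = backcalculate_season_alt start months
instance (start : String) (months : Int) (out : String) : Decidable (Spec_backcalculate_season start months out) := by unfold Spec_backcalculate_season; infer_instance

-- ===== CLAIM (what is proved, stated in full; the proofs are below) =====
def Claim_equal_backcalculate_season : Prop := ∀ (start : String) (months : Int), Dom_backcalculate_season start months → Pre_backcalculate_season start months → Spec_backcalculate_season start months (backcalculate_season start months)

-- ===== LEMMAS AND PROOFS =====

-- The two ports agree on any valid season once the residue of months//3 modulo 4 is fixed.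
lemma agree_of_mod (start : String) (months : Int)
    (hs : start ∈ ["Winter", "Spring", "Summer", "Fall"])
    (r : Int) (hr : PySem.Int.floordiv months 3 % 4 = r) (hr4 : r = 0 ∨ r = 1 ∨ r = 2 ∨ r = 3)
    (hn : ¬ (months = 1 ∨ months = 3)) :
    backcalculate_season start months = backcalculate_season_alt start months := by
  have h1 : PySem.Int.mod (PySem.Int.floordiv months 3) 4 = r := by
    rw [PySem.Int.mod_eq_emod_of_pos (by norm_num)]; exact hr
  have h2 : PySem.Int.mod (PySem.Int.floordiv months 3 - 1) 4 = (r + 3) % 4 := by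
    rw [PySem.Int.mod_eq_emod_of_pos (by norm_num)]; omega
  simp only [backcalculate_season, backcalculate_season_alt, if_neg hn, h1, h2]
  fin_cases hs <;> rcases hr4 with h | h | h | h <;> subst h <;> decide

theorem backcalculate_season_spec_aux (start : String) (months : Int)
    (hpre : Pre_backcalculate_season start months) :
    backcalculate_season start months = backcalculate_season_alt start months := by
  by_cases hn : months = 1 ∨ months = 3
  · simp only [backcalculate_season, backcalculate_season_alt, if_pos hn]
  · rcases hpre with h | h | ⟨_, hs⟩
    · exact absurd (Or.inl h) hn
    · exact absurd (Or.inr h) hn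
    · have hb : 0 ≤ PySem.Int.floordiv months 3 % 4 ∧ PySem.Int.floordiv months 3 % 4 < 4 :=
        ⟨Int.emod_nonneg _ (by norm_num), Int.emod_lt_of_pos _ (by norm_num)⟩
      exact agree_of_mod start months hs _ rfl (by omega) hn

-- ===== VERDICT (by name: the statement is the Claim_ definition above) =====
theorem backcalculate_season_spec : Claim_equal_backcalculate_season := by
  intro start months _ hpre
  exact backcalculate_season_spec_aux start months hpre
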